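-- pv_equiv track=rewrite | github.com/xxxbozzz/pcb-geo-system | core/linker.py | _safe_replace_first
-- ===== SOURCE A (Python) =====
-- def _safe_replace_first(content: str, keyword: str, replacement: str) -> str:
--     """
--     只替换正文中第一次出现的关键词。
--     跳过标题行（#开头）和已有的 Markdown 链接中的文字。
--     """
--     lines = content.split("\n")
--     replaced = False
--     result = []
--
--     for line in lines:
--         if replaced or line.startswith("#") or f"[{keyword}]" in line:
--             result.append(line)
--             continue
--
--         if keyword in line:
--             # 确保不在已有链接 [...](...)  内部
--             # 简单检查：keyword 前面不是 [ 字符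
--             idx = line.find(keyword)
--             before = line[:idx]
--             if "[" in before and "](" not in before[before.rfind("["):]:
--                 result.append(line)
--                 continue
--
--             line = line.replace(keyword, replacement, 1)
--             replaced = True
--
--         result.append(line)
--
--     return "\n".join(result)
-- ===== SOURCE B (Python) =====
-- def _safe_replace_first(content: str, keyword: str, replacement: str) -> str:
--     # Scan keyword occurrences in the flat string (no line list): for each
--     # candidate occurrence, reconstruct its surrounding line, test eligibility,
--     # and splice the content directly at the first eligible occurrence.
--     n = len(content)
--     pos = 0
--     while True:
--         i = content.find(keyword, pos)
--         if i == -1: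
--             return content
--         ls = content.rfind("\n", 0, i) + 1
--         le = content.find("\n", i)
--         if le == -1:
--             le = n
--         if le < i + len(keyword):
--             # occurrence spans a line break: not inside any single line
--             pos = le + 1
--             continue
--         line = content[ls:le]
--         if line.startswith("#") or "[" + keyword + "]" in line:
--             pos = le + 1
--             continue
--         before = content[ls:i]
--         if "[" in before and "](" not in before[before.rfind("["):]:
--             pos = le + 1
--             continue
--         return content[:i] + replacement + content[i + len(keyword):]
-- ===== Notes on version B (the rewrite author's own statement) =====
-- stated objective: alternative
-- what changed: B never builds a line list: it scans keyword occurrences in the flat string with a moving find start position, reconstructs only the surrounding line of each candidate occurrence via rfind/find of the nearest newlines, and splices the replacement directly into the content at the first eligible occurrence.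
import Mathlib
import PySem

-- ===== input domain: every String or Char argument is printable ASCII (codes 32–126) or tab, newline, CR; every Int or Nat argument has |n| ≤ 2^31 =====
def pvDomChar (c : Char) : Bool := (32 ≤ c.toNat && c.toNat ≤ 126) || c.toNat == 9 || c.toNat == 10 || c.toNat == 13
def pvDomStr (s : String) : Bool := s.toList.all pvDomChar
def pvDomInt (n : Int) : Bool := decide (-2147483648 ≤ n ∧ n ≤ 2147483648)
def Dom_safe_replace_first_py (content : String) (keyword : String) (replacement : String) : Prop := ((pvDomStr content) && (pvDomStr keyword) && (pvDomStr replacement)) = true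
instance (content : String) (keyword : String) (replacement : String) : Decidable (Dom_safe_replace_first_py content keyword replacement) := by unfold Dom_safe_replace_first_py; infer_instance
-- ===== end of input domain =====

-- B replaces A's line-splitting loop by a different algorithm: it scans keyword
-- occurrences in the flat string with a moving find position and splices the
-- content directly at the first eligible occurrence (objective: alternative).

-- ===== PORT A =====
-- exact hand port of Python's s.replace(old, new, 1): splice at the first occurrence
-- (find = -1 → unchanged; old = "" → find = 0 → new prepended, as in CPython)
def pvReplaceFirst (s : List Char) (old : List Char) (new : List Char) : List Char :=
  let i := PySem.Chars.find s old
  if i = -1 then s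
  else PySem.Chars.slice s none (some i) ++ new ++ PySem.Chars.slice s (some (i + (old.length : Int))) none

def pvStepA (kw rep : List Char) (st : Bool × List (List Char)) (line : List Char) :
    Bool × List (List Char) :=
  if st.1 || PySem.Chars.startswith line ['#'] || PySem.Chars.isIn ('[' :: kw ++ [']']) line then
    (st.1, st.2 ++ [line])
  else if PySem.Chars.isIn kw line then
    let idx := PySem.Chars.find line kw
    let before := PySem.Chars.slice line none (some idx)
    if PySem.Chars.isIn ['['] before &&
        !(PySem.Chars.isIn [']', '('] (PySem.Chars.slice before (some (PySem.Chars.rfind before ['['])) none)) then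
      (st.1, st.2 ++ [line])
    else
      (true, st.2 ++ [pvReplaceFirst line kw rep])
  else
    (st.1, st.2 ++ [line])

def safe_replace_first_py (content : String) (keyword : String) (replacement : String) : String :=
  -- content.split("\n"): separator is nonempty, so split? = some (splitOn …); splitOn is that value
  let lines := PySem.Chars.splitOn content.toList ['\n']
  let res := lines.foldl (pvStepA keyword.toList replacement.toList) (false, [])
  String.ofList (PySem.Chars.join ['\n'] res.2)

-- ===== PORT B =====
-- the loop of Source B, with a fuel argument as totality guard only: pos strictly
-- increases every iteration, so fuel = len(content)+2 is never exhausted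
def pvLoopB (cs kw rep : List Char) (pos : Int) : Nat → List Char
  | 0 => cs
  | fuel + 1 =>
    let i := PySem.Chars.findFrom cs kw pos none
    if i = -1 then cs
    else
      let ls := PySem.Chars.rfindFrom cs ['\n'] 0 (some i) + 1
      let le0 := PySem.Chars.findFrom cs ['\n'] i none
      let le := if le0 = -1 then (cs.length : Int) else le0
      if le < i + kw.length then pvLoopB cs kw rep (le + 1) fuel
      else
        let line := PySem.Chars.slice cs (some ls) (some le)
        if PySem.Chars.startswith line ['#'] || PySem.Chars.isIn ('[' :: kw ++ [']']) line then
          pvLoopB cs kw rep (le + 1) fuel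
        else
          let before := PySem.Chars.slice cs (some ls) (some i)
          if PySem.Chars.isIn ['['] before &&
              !(PySem.Chars.isIn [']', '('] (PySem.Chars.slice before (some (PySem.Chars.rfind before ['['])) none)) then
            pvLoopB cs kw rep (le + 1) fuel
          else
            PySem.Chars.slice cs none (some i) ++ rep ++ PySem.Chars.slice cs (some (i + kw.length)) none

def safe_replace_first_py_alt (content : String) (keyword : String) (replacement : String) : String :=
  String.ofList (pvLoopB content.toList keyword.toList replacement.toList 0
    (content.toList.length + 2))

-- ===== PRECONDITION & SPEC =====
def Spec_safe_replace_first_py (content : String) (keyword : String) (replacement : String) (out : String) : Prop := out = safe_replace_first_py_alt content keyword replacement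
instance (content : String) (keyword : String) (replacement : String) (out : String) : Decidable (Spec_safe_replace_first_py content keyword replacement out) := by unfold Spec_safe_replace_first_py; infer_instance

-- ===== CLAIM (what is proved, stated in full; the proofs are below) =====
def Claim_equal_safe_replace_first_py : Prop := ∀ (content : String) (keyword : String) (replacement : String), Dom_safe_replace_first_py content keyword replacement → Spec_safe_replace_first_py content keyword replacement (safe_replace_first_py content keyword replacement)

-- ===== LEMMAS AND PROOFS =====

theorem pvGoSucc (sub : List Char) (s : List Char) (k : Nat) :
    PySem.Chars.find.go sub s (k + 1) =
      if PySem.Chars.find.go sub s k = -1 then -1 else PySem.Chars.find.go sub s k + 1 := by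
  induction s generalizing k with
  | nil => rw [PySem.Chars.find.go.eq_1, PySem.Chars.find.go.eq_1]; split <;> simp
  | cons c t ih =>
    rw [PySem.Chars.find.go.eq_2, PySem.Chars.find.go.eq_2]
    split
    · simp
    · rw [ih]

theorem pvFindCons (c : Char) (t : List Char) (sub : List Char) :
    PySem.Chars.find (c :: t) sub =
      if sub.isPrefixOf (c :: t) then 0
      else if PySem.Chars.find t sub = -1 then -1 else PySem.Chars.find t sub + 1 := by
  rw [PySem.Chars.find, PySem.Chars.find.go.eq_2, show (0 + 1 : Nat) = 0 + 1 from rfl, pvGoSucc]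
  rfl

theorem pvFindNil (sub : List Char) :
    PySem.Chars.find [] sub = if sub.isEmpty then 0 else -1 := by
  rw [PySem.Chars.find, PySem.Chars.find.go.eq_1]; split <;> simp

theorem pvSinglePrefix (c : Char) (xs : List Char) :
    [c].isPrefixOf xs = true ↔ xs[0]? = some c := by
  cases xs with
  | nil => simp [List.isPrefixOf]
  | cons d t =>
    simp only [List.isPrefixOf, List.getElem?_cons_zero, Option.some.injEq, Bool.and_eq_true,
      beq_iff_eq]
    constructor
    · rintro ⟨h, -⟩; exact h.symm
    · intro h; exact ⟨h.symm, by simp⟩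

theorem pvPrefixSplitAppend {kw u w : List Char} (hnl : '\n' ∉ kw)
    (h : kw <+: (u ++ '\n' :: w)) : kw <+: u := by
  rcases (show kw.length ≤ u.length ∨ u.length < kw.length by omega) with hle | hlt
  · rw [List.prefix_iff_eq_take] at h ⊢
    rw [List.take_append_of_le_length hle] at h
    exact h
  · exfalso
    apply hnl
    have hidx : (u ++ '\n' :: w)[u.length]? = some '\n' := by simp
    have := List.prefix_iff_eq_take.mp h
    have hkw : kw[u.length]? = some '\n' := by
      rw [this, List.getElem?_take_of_lt (by omega)]
      exact hidx
    exact List.mem_of_getElem? hkw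

theorem pvFindAppendNl {kw u : List Char} (w : List Char) (hnl : '\n' ∉ kw) (hu : '\n' ∉ u) :
    PySem.Chars.find (u ++ '\n' :: w) kw =
      if PySem.Chars.find u kw = -1 then
        (if PySem.Chars.find w kw = -1 then -1 else (u.length : Int) + 1 + PySem.Chars.find w kw)
      else PySem.Chars.find u kw := by
  induction u with
  | nil =>
    rw [List.nil_append, pvFindCons, pvFindNil]
    have hw := PySem.Chars.neg_one_le_find w kw
    cases kw with
    | nil => simp
    | cons k0 kt =>
      have hpre : (k0 :: kt).isPrefixOf ('\n' :: w) = false := by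
        rw [Bool.eq_false_iff]
        intro hc
        have : k0 :: kt <+: '\n' :: w := List.isPrefixOf_iff_prefix.mp hc
        rcases this with ⟨t, ht⟩
        apply hnl
        have : k0 = '\n' := by
          have := congrArg (·[0]?) ht
          simpa using this
        simp [this]
      rw [hpre]
      simp only [List.isEmpty_cons, List.length_nil, Nat.cast_zero, Bool.false_eq_true, if_false]
      split_ifs <;> omega
  | cons c u' ih =>
    have hu' : '\n' ∉ u' := fun h => hu (List.mem_cons_of_mem c h)
    have hc : c ≠ '\n' := fun h => hu (h ▸ List.mem_cons_self ..)
    have hpre : kw.isPrefixOf (c :: (u' ++ '\n' :: w)) = kw.isPrefixOf (c :: u') := by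
      by_cases h : kw.isPrefixOf (c :: u') = true
      · rw [h]
        have : kw <+: c :: u' := List.isPrefixOf_iff_prefix.mp h
        exact List.isPrefixOf_iff_prefix.mpr (List.IsPrefix.trans this ⟨'\n' :: w, by simp⟩)
      · rw [Bool.eq_false_iff.mpr h, Bool.eq_false_iff]
        intro hcc
        apply h
        apply List.isPrefixOf_iff_prefix.mpr
        exact pvPrefixSplitAppend hnl (u := c :: u') (List.isPrefixOf_iff_prefix.mp hcc)
    rw [List.cons_append, pvFindCons, hpre, pvFindCons, ih hu']
    have h1 := PySem.Chars.neg_one_le_find u' kw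
    have h2 := PySem.Chars.neg_one_le_find w kw
    simp only [List.length_cons]
    split <;> [rfl; skip]
    push_cast
    split_ifs <;> omega

theorem pvFindSingleNeg {c : Char} {u : List Char} (h : c ∉ u) :
    PySem.Chars.find u [c] = -1 := by
  induction u with
  | nil => simp [pvFindNil]
  | cons d t ih =>
    rw [pvFindCons]
    have hd : d ≠ c := fun hh => h (hh ▸ List.mem_cons_self ..)
    have : ([c].isPrefixOf (d :: t)) = false := by
      rw [Bool.eq_false_iff]
      intro hc
      exact hd (by simpa using (pvSinglePrefix c (d :: t)).mp hc)
    rw [this, ih (fun hh => h (List.mem_cons_of_mem d hh))]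
    simp

theorem pvFindSingleApp {c : Char} {u : List Char} (w : List Char) (h : c ∉ u) :
    PySem.Chars.find (u ++ c :: w) [c] = u.length := by
  induction u with
  | nil =>
    rw [List.nil_append, pvFindCons]
    have : ([c].isPrefixOf (c :: w)) = true := (pvSinglePrefix c (c :: w)).mpr (by simp)
    rw [this]
    simp
  | cons d t ih =>
    rw [List.cons_append, pvFindCons]
    have hd : d ≠ c := fun hh => h (hh ▸ List.mem_cons_self ..)
    have hp : ([c].isPrefixOf (d :: (t ++ c :: w))) = false := by
      rw [Bool.eq_false_iff]
      intro hc
      exact hd (by simpa using (pvSinglePrefix c _).mp hc)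
    rw [hp, ih (fun hh => h (List.mem_cons_of_mem d hh))]
    simp only [List.length_cons]
    push_cast
    omega

theorem pvSinglePrefix' (c : Char) (s : List Char) (j : Nat) :
    [c].isPrefixOf (s.drop j) = true ↔ s[j]? = some c := by
  have : (s.drop j)[0]? = s[j]? := by
    rw [List.getElem?_drop]
    simp
  rw [← this]
  cases h : s.drop j with
  | nil => simp [List.isPrefixOf]
  | cons d t =>
    simp only [List.isPrefixOf, List.getElem?_cons_zero, Option.some.injEq, Bool.and_eq_true,
      beq_iff_eq]
    constructor
    · rintro ⟨hh, -⟩; exact hh.symm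
    · intro hh; exact ⟨hh.symm, by simp⟩

theorem pvRGoNone {c : Char} {s : List Char} {k : Nat}
    (h : ∀ j ≤ k, s[j]? ≠ some c) : PySem.Chars.rfind.go s [c] k = -1 := by
  induction k with
  | zero =>
    rw [PySem.Chars.rfind.go.eq_1]
    have := h 0 (Nat.le_refl 0)
    rw [if_neg]
    intro hc
    exact this ((pvSinglePrefix' c s 0).mp (by simpa using hc))
  | succ k ih =>
    rw [PySem.Chars.rfind.go.eq_2]
    rw [if_neg]
    · exact ih (fun j hj => h j (Nat.le_succ_of_le hj))
    · intro hc
      exact h (k + 1) (Nat.le_refl _) ((pvSinglePrefix' c s (k + 1)).mp hc)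

theorem pvRGoFound {c : Char} {s : List Char} {m k : Nat}
    (hm : s[m]? = some c) (hmax : ∀ j, m < j → j ≤ k → s[j]? ≠ some c) (hmk : m ≤ k) :
    PySem.Chars.rfind.go s [c] k = m := by
  induction k with
  | zero =>
    rw [PySem.Chars.rfind.go.eq_1]
    have hm0 : m = 0 := Nat.le_zero.mp hmk
    rw [if_pos]
    · simp [hm0]
    · subst hm0
      exact (pvSinglePrefix' c s 0).mpr (by simpa using hm)
  | succ k ih =>
    rw [PySem.Chars.rfind.go.eq_2]
    by_cases hk : m = k + 1
    · rw [if_pos]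
      · simp [hk]
      · subst hk; exact (pvSinglePrefix' c s (k + 1)).mpr hm
    · rw [if_neg]
      · exact ih (fun j hj hjk => hmax j hj (Nat.le_succ_of_le hjk)) (by omega)
      · intro hc
        exact hmax (k + 1) (by omega) (Nat.le_refl _) ((pvSinglePrefix' c s (k + 1)).mp hc)

theorem pvRfindNone {c : Char} {u : List Char} (h : c ∉ u) :
    PySem.Chars.rfind u [c] = -1 := by
  rw [PySem.Chars.rfind]
  exact pvRGoNone (fun j _ hj => h (List.mem_of_getElem? hj))

theorem pvRfindLast {c : Char} {u : List Char} (v : List Char) (h : c ∉ u) :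
    PySem.Chars.rfind (v ++ c :: u) [c] = v.length := by
  rw [PySem.Chars.rfind]
  apply pvRGoFound
  · simp
  · intro j hj _ hc
    have hjlen : j < (v ++ c :: u).length := by
      by_contra hge
      rw [List.getElem?_eq_none_iff.mpr (by omega)] at hc
      simp at hc
    apply h
    have : (v ++ c :: u)[j]? = (c :: u)[j - v.length]? := by
      rw [List.getElem?_append_right (by omega)]
    rw [this] at hc
    have hj' : 0 < j - v.length := by omega
    rcases Nat.exists_eq_add_of_lt hj' with ⟨k, hk⟩
    have : (c :: u)[j - v.length]? = u[j - v.length - 1]? := by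
      cases hjv : j - v.length with
      | zero => omega
      | succ k => simp
    rw [this] at hc
    exact List.mem_of_getElem? hc
  · simp

theorem pvFindFromPast (cs sub : List Char) (p : Int) (h : (cs.length : Int) < p) :
    PySem.Chars.findFrom cs sub p none = -1 := by
  simp only [PySem.Chars.findFrom]
  rw [if_pos]
  omega

theorem pvRfindFromTake (cs : List Char) (c : Char) (i : Int) (h0 : 0 ≤ i)
    (h1 : i ≤ cs.length) :
    PySem.Chars.rfindFrom cs [c] 0 (some i) = PySem.Chars.rfind (cs.take i.toNat) [c] := by
  have hr := PySem.Chars.neg_one_le_find (List.take i.toNat cs) [c]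
  simp only [PySem.Chars.rfindFrom]
  split_ifs <;> simp_all <;> omega
  
def pvSplit : List Char → List (List Char)
  | [] => [[]]
  | c :: t => if c = '\n' then [] :: pvSplit t else (pvSplit t).modifyHead (c :: ·)

theorem pvSplit_ne_nil (cs : List Char) : pvSplit cs ≠ [] := by
  induction cs with
  | nil => simp [pvSplit]
  | cons c t =>
    simp only [pvSplit]
    split
    · simp
    · rename_i ih _
      cases h : pvSplit t with
      | nil => exact absurd h ih
      | cons a l => simp

theorem pvSplit_no_nl (cs : List Char) : ∀ L ∈ pvSplit cs, '\n' ∉ L := by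
  induction cs with
  | nil => simp [pvSplit]
  | cons c t ih =>
    intro L hL
    simp only [pvSplit] at hL
    split at hL
    · rcases List.mem_cons.mp hL with h | h
      · simp [h]
      · exact ih L h
    · cases h : pvSplit t with
      | nil => exact absurd h (pvSplit_ne_nil t)
      | cons a l =>
        rw [h, List.modifyHead_cons] at hL
        rcases List.mem_cons.mp hL with hh | hh
        · subst hh
          intro hm
          rcases List.mem_cons.mp hm with hc | hc
          · exact ‹¬ c = '\n'› hc.symm
          · exact ih a (h ▸ List.mem_cons_self ..) hc
        · exact ih L (h ▸ List.mem_cons_of_mem a hh)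

theorem pvSplit_join (cs : List Char) : PySem.Chars.join ['\n'] (pvSplit cs) = cs := by
  induction cs with
  | nil => simp [pvSplit, PySem.Chars.join_singleton]
  | cons c t ih =>
    simp only [pvSplit]
    split
    · rename_i hc
      cases h : pvSplit t with
      | nil => exact absurd h (pvSplit_ne_nil t)
      | cons a l =>
        rw [PySem.Chars.join_cons_cons]
        rw [← h, ih]
        simp [hc]
    · cases h : pvSplit t with
      | nil => exact absurd h (pvSplit_ne_nil t)
      | cons a l =>
        rw [List.modifyHead_cons]
        cases l with
        | nil =>
          rw [PySem.Chars.join_singleton]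
          rw [h, PySem.Chars.join_singleton] at ih
          rw [← ih]
        | cons b l' =>
          rw [PySem.Chars.join_cons_cons]
          rw [h, PySem.Chars.join_cons_cons] at ih
          rw [← ih]
          simp

theorem pvSplitGo (fuel : Nat) : ∀ (l cur : List Char) (acc : List (List Char)),
    l.length < fuel →
    PySem.Chars.splitOn.go ['\n'] fuel l cur acc =
      acc.reverse ++ (pvSplit l).modifyHead (cur.reverse ++ ·) := by
  induction fuel with
  | zero => intro l cur acc h; omega
  | succ f ih =>
    intro l cur acc h
    cases l with
    | nil =>
      rw [PySem.Chars.splitOn.go.eq_def]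
      simp [pvSplit]
    | cons c rest =>
      rw [PySem.Chars.splitOn.go.eq_def]
      simp only []
      by_cases hc : c = '\n'
      · rw [if_pos (by rw [pvSinglePrefix]; simp [hc])]
        rw [show List.drop ['\n'].length (c :: rest) = rest by simp]
        rw [ih rest [] (cur.reverse :: acc) (by simpa using h)]
        simp only [pvSplit, if_pos hc, List.reverse_cons, List.reverse_nil, List.nil_append,
          List.modifyHead_cons]
        cases hs : pvSplit rest with
        | nil => exact absurd hs (pvSplit_ne_nil rest)
        | cons a l => simp
      · rw [if_neg (by rw [pvSinglePrefix]; simp [hc])]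
        rw [ih rest (c :: cur) acc (by simpa using h)]
        simp only [pvSplit, if_neg hc]
        cases hs : pvSplit rest with
        | nil => exact absurd hs (pvSplit_ne_nil rest)
        | cons a l => simp

theorem pvSplitOn_eq (cs : List Char) :
    PySem.Chars.splitOn cs ['\n'] = pvSplit cs := by
  rw [PySem.Chars.splitOn, pvSplitGo (cs.length + 1) cs [] [] (by omega)]
  cases hs : pvSplit cs with
  | nil => exact absurd hs (pvSplit_ne_nil cs)
  | cons a l => simp

def pvElig (kw : List Char) (line : List Char) : Bool :=
  if PySem.Chars.startswith line ['#'] || PySem.Chars.isIn ('[' :: kw ++ [']']) line ||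
      !PySem.Chars.isIn kw line then
    false
  else
    let before := PySem.Chars.slice line none (some (PySem.Chars.find line kw))
    !(PySem.Chars.isIn ['['] before &&
      !(PySem.Chars.isIn [']', '('] (PySem.Chars.slice before (some (PySem.Chars.rfind before ['['])) none)))

def pvSpliced (kw rep : List Char) (lines : List (List Char)) : List (List Char) :=
  match lines.findIdx? (pvElig kw) with
  | some m => lines.set m (pvReplaceFirst (lines.getD m []) kw rep)
  | none => lines

theorem pvFoldlStepATrue (kw rep : List Char) (ls : List (List Char)) (acc : List (List Char)) :
    ls.foldl (pvStepA kw rep) (true, acc) = (true, acc ++ ls) := by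
  induction ls generalizing acc with
  | nil => simp
  | cons l t ih => simp [pvStepA, ih]

theorem pvFoldlStepAFalse (kw rep : List Char) (ls : List (List Char)) (acc : List (List Char)) :
    ls.foldl (pvStepA kw rep) (false, acc) =
      match ls.findIdx? (pvElig kw) with
      | some i => (true, acc ++ ls.set i (pvReplaceFirst (ls.getD i []) kw rep))
      | none => (false, acc ++ ls) := by
  induction ls generalizing acc with
  | nil => simp
  | cons l t ih =>
    rw [List.findIdx?_cons]
    by_cases he : pvElig kw l
    · have hstep : pvStepA kw rep (false, acc) l =
          (true, acc ++ [pvReplaceFirst l kw rep]) := by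
        simp only [pvElig] at he
        simp only [pvStepA]
        split_ifs at he ⊢ with h1 h2 h3 <;> simp_all
      simp [List.foldl_cons, hstep, pvFoldlStepATrue, he]
    · have hstep : pvStepA kw rep (false, acc) l = (false, acc ++ [l]) := by
        simp only [pvElig] at he
        simp only [pvStepA]
        split_ifs at he ⊢ with h1 h2 h3 <;> simp_all
      simp only [List.foldl_cons, hstep, ih, he, Bool.false_eq_true, ite_false]
      cases h : t.findIdx? (pvElig kw) <;>
        simp [List.getD, List.set]

theorem pvFindFromBounds (cs sub : List Char) (p : Int)
    (h : PySem.Chars.findFrom cs sub p none ≠ -1) :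
    0 ≤ PySem.Chars.findFrom cs sub p none ∧ p ≤ PySem.Chars.findFrom cs sub p none ∧
      PySem.Chars.findFrom cs sub p none ≤ cs.length := by
  have h1 := PySem.Chars.neg_one_le_find (List.drop (if p < 0 then (if p + cs.length < 0 then 0 else p + cs.length) else p).toNat (List.take (cs.length : Int).toNat cs)) sub
  have h2 := PySem.Chars.find_le_length (List.drop (if p < 0 then (if p + cs.length < 0 then 0 else p + cs.length) else p).toNat (List.take (cs.length : Int).toNat cs)) sub
  simp only [PySem.Chars.findFrom] at h ⊢
  split_ifs at h ⊢ with h3 h4 h5 <;>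
    simp_all [List.length_drop] <;> omega

theorem pvLoopBPast (cs kw rep : List Char) (p : Int) (fuel : Nat)
    (h : (cs.length : Int) < p) : pvLoopB cs kw rep p fuel = cs := by
  cases fuel with
  | zero => rfl
  | succ f =>
    rw [pvLoopB]
    rw [if_pos (pvFindFromPast cs kw p h)]

theorem pvLoopBCongr (cs kw rep : List Char) (p q : Int) (fuel : Nat)
    (h : PySem.Chars.findFrom cs kw p none = PySem.Chars.findFrom cs kw q none) :
    pvLoopB cs kw rep p fuel = pvLoopB cs kw rep q fuel := by
  cases fuel with
  | zero => rfl
  | succ f => rw [pvLoopB, pvLoopB, h]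


-- bridges between find and isIn / pvElig
theorem pvIsInOfFind {L kw : List Char} (h : PySem.Chars.find L kw ≠ -1) :
    PySem.Chars.isIn kw L = true := by
  rw [PySem.Chars.isIn_iff_infix]
  exact (PySem.Chars.find_ne_neg_one_iff L kw).mp h

theorem pvEligFalseOfFind {kw L : List Char} (h : PySem.Chars.find L kw = -1) :
    pvElig kw L = false := by
  have : PySem.Chars.isIn kw L = false := by
    rw [PySem.Chars.isIn_eq_false_iff]
    exact (PySem.Chars.find_eq_neg_one_iff L kw).mp h
  simp [pvElig, this]

theorem pvEligOfFind {kw L : List Char} (jn : Nat) (hf : PySem.Chars.find L kw = (jn : Int)) :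
    pvElig kw L =
      (!(PySem.Chars.startswith L ['#'] || PySem.Chars.isIn ('[' :: kw ++ [']']) L) &&
        !(PySem.Chars.isIn ['['] (L.take jn) &&
          !(PySem.Chars.isIn [']', '('] (PySem.Chars.slice (L.take jn)
              (some (PySem.Chars.rfind (L.take jn) ['['])) none)))) := by
  have hin : PySem.Chars.isIn kw L = true := pvIsInOfFind (by omega)
  have hsl : PySem.Chars.slice L none (some (PySem.Chars.find L kw)) = L.take jn := by
    rw [hf, PySem.Chars.slice_eq_listSlice, PySem.List.slice_to L (by omega)]
    simp
  simp only [pvElig, hin, hsl, Bool.not_true, Bool.or_false]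
  cases h1 : (PySem.Chars.startswith L ['#'] || PySem.Chars.isIn ('[' :: kw ++ [']']) L) <;> simp

theorem pvFindLen {L kw : List Char} (jn : Nat) (hf : PySem.Chars.find L kw = (jn : Int)) :
    kw <+: L.drop jn ∧ jn + kw.length ≤ L.length := by
  have h0 : 0 ≤ PySem.Chars.find L kw := by omega
  have hsp := (PySem.Chars.find_spec (s := L) (sub := kw) h0).1
  rw [hf] at hsp
  simp only [Int.toNat_natCast] at hsp
  refine ⟨hsp, ?_⟩
  have := hsp.length_le
  have hl := PySem.Chars.find_le_length L kw
  rw [hf] at hl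
  simp only [List.length_drop] at this
  omega

theorem pvReplaceFirstChar {L kw : List Char} (rep : List Char) (jn : Nat)
    (hf : PySem.Chars.find L kw = (jn : Int)) :
    pvReplaceFirst L kw rep = L.take jn ++ rep ++ L.drop (jn + kw.length) := by
  simp only [pvReplaceFirst, hf]
  rw [if_neg (by omega)]
  rw [PySem.Chars.slice_eq_listSlice, PySem.Chars.slice_eq_listSlice,
    PySem.List.slice_to L (by omega), PySem.List.slice_from L (by positivity)]
  have h1 : ((jn : Int)).toNat = jn := by omega
  have h2 : ((jn : Int) + (kw.length : Int)).toNat = jn + kw.length := by omega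
  rw [h1, h2]

theorem pvSplicedConsFalse {kw L : List Char} (rep : List Char) (ls : List (List Char))
    (h : pvElig kw L = false) :
    pvSpliced kw rep (L :: ls) = L :: pvSpliced kw rep ls := by
  simp only [pvSpliced, List.findIdx?_cons, h, Bool.false_eq_true, if_false]
  cases hf : ls.findIdx? (pvElig kw) <;> simp [List.getD]

theorem pvSplicedConsTrue {kw L : List Char} (rep : List Char) (ls : List (List Char))
    (h : pvElig kw L = true) :
    pvSpliced kw rep (L :: ls) = pvReplaceFirst L kw rep :: ls := by
  simp [pvSpliced, List.findIdx?_cons, h, List.getD]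

theorem pvSplicedNe {kw : List Char} (rep : List Char) (ls : List (List Char)) (h : ls ≠ []) :
    pvSpliced kw rep ls ≠ [] := by
  simp only [pvSpliced]
  cases hf : ls.findIdx? (pvElig kw) <;> simp_all

theorem pvJoinConsNe (L : List Char) (ls : List (List Char)) (h : ls ≠ []) :
    PySem.Chars.join ['\n'] (L :: ls) = L ++ '\n' :: PySem.Chars.join ['\n'] ls := by
  cases ls with
  | nil => exact absurd rfl h
  | cons b t => rw [PySem.Chars.join_cons_cons]; simp

theorem pvSplicedNone {kw : List Char} (rep : List Char) (ls : List (List Char))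
    (h : ∀ L ∈ ls, pvElig kw L = false) : pvSpliced kw rep ls = ls := by
  simp only [pvSpliced]
  rw [List.findIdx?_eq_none_iff.mpr (fun L hL => by simp [h L hL])]

theorem pvFindNilSub (L : List Char) : PySem.Chars.find L [] = 0 := by
  cases L with
  | nil => rw [pvFindNil]; rfl
  | cons c t => rw [pvFindCons, if_pos (by simp [List.isPrefixOf])]

theorem pvLoopBMain (kw rep : List Char) (hnl : '\n' ∉ kw) :
    ∀ (rest : List (List Char)) (V : List Char) (fuel : Nat), rest ≠ [] →
      (∀ L ∈ rest, '\n' ∉ L) → (V = [] ∨ ∃ V', V = V' ++ ['\n']) →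
      (V ++ PySem.Chars.join ['\n'] rest).length + 2 ≤ V.length + fuel →
      pvLoopB (V ++ PySem.Chars.join ['\n'] rest) kw rep (V.length : Int) fuel =
        V ++ PySem.Chars.join ['\n'] (pvSpliced kw rep rest) := by
  intro rest
  induction rest with
  | nil => intro V fuel h; exact absurd rfl h
  | cons L rest2 ih =>
    intro V fuel _ hLn hV hfuel
    have hLnl : '\n' ∉ L := hLn L (List.mem_cons_self ..)
    cases rest2 with
    | nil =>
      -- last line of the content: cs = V ++ L
      rw [PySem.Chars.join_singleton] at hfuel ⊢
      obtain ⟨f, rfl⟩ : ∃ f, fuel = f + 1 := ⟨fuel - 1, by simp at hfuel; omega⟩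
      have hdropn : (V ++ L).drop V.length = L := by simp
      by_cases hj : PySem.Chars.find L kw = -1
      · have hI : PySem.Chars.findFrom (V ++ L) kw (V.length : Int) none = -1 := by
          rw [PySem.Chars.findFrom_natCast _ _ V.length (by simp), hdropn, if_pos hj]
        rw [pvLoopB]
        rw [if_pos hI]
        rw [pvSplicedConsFalse rep [] (pvEligFalseOfFind hj), pvSplicedNone rep [] (by simp),
          PySem.Chars.join_singleton]
      · have h0 : 0 ≤ PySem.Chars.find L kw := by
          have := PySem.Chars.neg_one_le_find L kw; omega
        obtain ⟨jn, hf⟩ : ∃ jn : Nat, PySem.Chars.find L kw = (jn : Int) :=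
          ⟨(PySem.Chars.find L kw).toNat, by omega⟩
        obtain ⟨hpre, hjk⟩ := pvFindLen jn hf
        have hcsl : (V ++ L).length = V.length + L.length := by simp
        have hI : PySem.Chars.findFrom (V ++ L) kw (V.length : Int) none =
            ((V.length + jn : Nat) : Int) := by
          rw [PySem.Chars.findFrom_natCast _ _ V.length (by simp), hdropn, hf,
            if_neg (by omega)]
          push_cast; ring
        have hdropnj : (V ++ L).drop (V.length + jn) = L.drop jn := by
          rw [List.drop_append]; simp
        have hLe0 : PySem.Chars.findFrom (V ++ L) ['\n'] ((V.length + jn : Nat) : Int) none = -1 := by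
          rw [PySem.Chars.findFrom_natCast _ _ (V.length + jn) (by simp; omega), hdropnj,
            if_pos (pvFindSingleNeg (fun h => hLnl (List.mem_of_mem_drop h)))]
        have htake : (V ++ L).take (V.length + jn) = V ++ L.take jn := by
          rw [List.take_append]; simp
        have hRf : PySem.Chars.rfindFrom (V ++ L) ['\n'] 0 (some ((V.length + jn : Nat) : Int)) =
            (V.length : Int) - 1 := by
          rw [pvRfindFromTake _ '\n' _ (by omega) (by simp; omega),
            show (((V.length + jn : Nat) : Int)).toNat = V.length + jn by omega, htake]
          rcases hV with hVnil | ⟨V', hV'⟩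
          · subst hVnil
            simp only [List.nil_append, List.length_nil]
            rw [pvRfindNone (fun h => hLnl (List.mem_of_mem_take h))]
            rfl
          · subst hV'
            rw [List.append_assoc, List.singleton_append,
              pvRfindLast V' (fun h => hLnl (List.mem_of_mem_take h))]
            simp
        have hLine : PySem.Chars.slice (V ++ L) (some ((V.length : Int)))
            (some (((V ++ L).length : Int))) = L := by
          rw [PySem.Chars.slice_eq_listSlice, hcsl,
            show (((V.length + L.length : Nat)) : Int) = ((V.length + L.length : Nat) : Int) from rfl,
            PySem.List.slice_natCast (V ++ L) V.length (V.length + L.length)]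
          simp
        have hBefore : PySem.Chars.slice (V ++ L) (some ((V.length : Int)))
            (some ((V.length + jn : Nat) : Int)) = L.take jn := by
          rw [PySem.Chars.slice_eq_listSlice,
            PySem.List.slice_natCast (V ++ L) V.length (V.length + jn)]
          rw [hdropn]
          simp
        rw [pvLoopB]
        rw [if_neg (by rw [hI]; omega)]
        simp only [hI, hLe0, hRf, if_true]
        rw [show ((V.length : Int) - 1) + 1 = (V.length : Int) by omega]
        rw [if_neg (show ¬ (((V ++ L).length : Int) < ((V.length + jn : Nat) : Int) + (kw.length : Int)) by
          rw [hcsl]; push_cast; omega)]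
        rw [hLine, hBefore]
        by_cases hb1 : (PySem.Chars.startswith L ['#'] ||
            PySem.Chars.isIn ('[' :: kw ++ [']']) L) = true
        · rw [if_pos hb1]
          have hel : pvElig kw L = false := by
            rw [pvEligOfFind jn hf, hb1]; rfl
          rw [pvLoopBPast _ _ _ _ _ (by rw [hcsl]; push_cast; omega)]
          rw [pvSplicedConsFalse rep [] hel, pvSplicedNone rep [] (by simp),
            PySem.Chars.join_singleton]
        · rw [if_neg hb1]
          by_cases hb2 : (PySem.Chars.isIn ['['] (L.take jn) &&
              !(PySem.Chars.isIn [']', '('] (PySem.Chars.slice (L.take jn)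
                (some (PySem.Chars.rfind (L.take jn) ['['])) none))) = true
          · rw [if_pos hb2]
            have hel : pvElig kw L = false := by
              rw [pvEligOfFind jn hf, hb2]; simp
            rw [pvLoopBPast _ _ _ _ _ (by rw [hcsl]; push_cast; omega)]
            rw [pvSplicedConsFalse rep [] hel, pvSplicedNone rep [] (by simp),
              PySem.Chars.join_singleton]
          · rw [if_neg hb2]
            have hel : pvElig kw L = true := by
              simp only [Bool.not_eq_true] at hb1 hb2
              rw [pvEligOfFind jn hf, hb1, hb2]; rfl
            have hS1 : PySem.Chars.slice (V ++ L) none (some ((V.length + jn : Nat) : Int)) =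
                V ++ L.take jn := by
              rw [PySem.Chars.slice_eq_listSlice, PySem.List.slice_to _ (by positivity),
                show (((V.length + jn : Nat) : Int)).toNat = V.length + jn by omega, htake]
            have hS2 : PySem.Chars.slice (V ++ L)
                (some (((V.length + jn : Nat) : Int) + (kw.length : Int))) none =
                L.drop (jn + kw.length) := by
              rw [PySem.Chars.slice_eq_listSlice, PySem.List.slice_from _ (by positivity),
                show ((((V.length + jn : Nat) : Int)) + (kw.length : Int)).toNat =
                  V.length + (jn + kw.length) by omega]
              rw [List.drop_append]; simp
            rw [hS1, hS2, pvSplicedConsTrue rep [] hel, PySem.Chars.join_singleton,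
              pvReplaceFirstChar rep jn hf]
            simp
    | cons L2 rest3 =>
      have hrest2 : ∀ M ∈ (L2 :: rest3), '\n' ∉ M := fun M hM => hLn M (List.mem_cons_of_mem L hM)
      rw [pvJoinConsNe L (L2 :: rest3) (by simp)] at hfuel ⊢
      have hshape : V ++ (L ++ '\n' :: PySem.Chars.join ['\n'] (L2 :: rest3)) =
          (V ++ L ++ ['\n']) ++ PySem.Chars.join ['\n'] (L2 :: rest3) := by simp
      have hdropn : (V ++ (L ++ '\n' :: PySem.Chars.join ['\n'] (L2 :: rest3))).drop V.length =
          L ++ '\n' :: PySem.Chars.join ['\n'] (L2 :: rest3) := by simp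
      have hcsl : (V ++ (L ++ '\n' :: PySem.Chars.join ['\n'] (L2 :: rest3))).length =
          V.length + L.length + 1 + (PySem.Chars.join ['\n'] (L2 :: rest3)).length := by
        simp; omega
      by_cases hj : PySem.Chars.find L kw = -1
      · have hkwne : kw ≠ [] := by
          intro h
          rw [h, pvFindNilSub] at hj
          exact absurd hj (by norm_num)
        have hdropn2 : (V ++ (L ++ '\n' :: PySem.Chars.join ['\n'] (L2 :: rest3))).drop
            (V ++ L ++ ['\n']).length = PySem.Chars.join ['\n'] (L2 :: rest3) := by
          rw [hshape]
          simp
        have hcongr : PySem.Chars.findFrom (V ++ (L ++ '\n' :: PySem.Chars.join ['\n'] (L2 :: rest3)))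
            kw (V.length : Int) none =
            PySem.Chars.findFrom (V ++ (L ++ '\n' :: PySem.Chars.join ['\n'] (L2 :: rest3)))
            kw ((V ++ L ++ ['\n']).length : Int) none := by
          rw [PySem.Chars.findFrom_natCast _ _ V.length (by simp),
            PySem.Chars.findFrom_natCast _ _ (V ++ L ++ ['\n']).length (by rw [hcsl]; simp; omega),
            hdropn, hdropn2, pvFindAppendNl _ hnl hLnl, hj, if_pos rfl]
          have := PySem.Chars.neg_one_le_find (PySem.Chars.join ['\n'] (L2 :: rest3)) kw
          split_ifs <;> first | rfl | (simp; omega)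
        rw [pvLoopBCongr _ kw rep _ _ fuel hcongr, hshape]
        rw [ih (V ++ L ++ ['\n']) fuel (by simp) hrest2 (Or.inr ⟨V ++ L, rfl⟩)
          (by simp at hfuel ⊢; omega)]
        rw [pvSplicedConsFalse rep _ (pvEligFalseOfFind hj),
          pvJoinConsNe _ _ (pvSplicedNe rep _ (by simp))]
        simp
      · have h0 : 0 ≤ PySem.Chars.find L kw := by
          have := PySem.Chars.neg_one_le_find L kw; omega
        obtain ⟨jn, hf⟩ : ∃ jn : Nat, PySem.Chars.find L kw = (jn : Int) :=
          ⟨(PySem.Chars.find L kw).toNat, by omega⟩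
        obtain ⟨hpre, hjk⟩ := pvFindLen jn hf
        have hjL : jn ≤ L.length := by omega
        have hI : PySem.Chars.findFrom (V ++ (L ++ '\n' :: PySem.Chars.join ['\n'] (L2 :: rest3)))
            kw (V.length : Int) none = ((V.length + jn : Nat) : Int) := by
          rw [PySem.Chars.findFrom_natCast _ _ V.length (by simp), hdropn,
            pvFindAppendNl _ hnl hLnl, hf, if_neg (by omega), if_neg (by omega)]
          push_cast; ring
        have hdropnj : (V ++ (L ++ '\n' :: PySem.Chars.join ['\n'] (L2 :: rest3))).drop
            (V.length + jn) = L.drop jn ++ '\n' :: PySem.Chars.join ['\n'] (L2 :: rest3) := by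
          rw [List.drop_append]
          have h1 : List.drop (V.length + jn) V = [] := List.drop_eq_nil_of_le (by omega)
          simp [h1, List.drop_append_of_le_length hjL]
        have hLe0 : PySem.Chars.findFrom (V ++ (L ++ '\n' :: PySem.Chars.join ['\n'] (L2 :: rest3)))
            ['\n'] ((V.length + jn : Nat) : Int) none = ((V.length + L.length : Nat) : Int) := by
          rw [PySem.Chars.findFrom_natCast _ _ (V.length + jn) (by rw [hcsl]; omega), hdropnj,
            pvFindSingleApp _ (fun h => hLnl (List.mem_of_mem_drop h)), List.length_drop]
          rw [if_neg (by omega)]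
          omega
        have htake : (V ++ (L ++ '\n' :: PySem.Chars.join ['\n'] (L2 :: rest3))).take
            (V.length + jn) = V ++ L.take jn := by
          rw [List.take_append]
          have h1 : List.take (V.length + jn) V = V := List.take_of_length_le (by omega)
          simp [h1, List.take_append_of_le_length hjL]
        have hRf : PySem.Chars.rfindFrom (V ++ (L ++ '\n' :: PySem.Chars.join ['\n'] (L2 :: rest3)))
            ['\n'] 0 (some ((V.length + jn : Nat) : Int)) = (V.length : Int) - 1 := by
          rw [pvRfindFromTake _ '\n' _ (by omega) (by rw [hcsl]; omega),
            show (((V.length + jn : Nat) : Int)).toNat = V.length + jn by omega, htake]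
          rcases hV with hVnil | ⟨V', hV'⟩
          · subst hVnil
            simp only [List.nil_append, List.length_nil]
            rw [pvRfindNone (fun h => hLnl (List.mem_of_mem_take h))]
            rfl
          · subst hV'
            rw [List.append_assoc, List.singleton_append,
              pvRfindLast V' (fun h => hLnl (List.mem_of_mem_take h))]
            simp
        have hLine : PySem.Chars.slice (V ++ (L ++ '\n' :: PySem.Chars.join ['\n'] (L2 :: rest3)))
            (some ((V.length : Int))) (some ((V.length + L.length : Nat) : Int)) = L := by
          rw [PySem.Chars.slice_eq_listSlice,
            PySem.List.slice_natCast _ V.length (V.length + L.length), hdropn]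
          simp
        have hBefore : PySem.Chars.slice (V ++ (L ++ '\n' :: PySem.Chars.join ['\n'] (L2 :: rest3)))
            (some ((V.length : Int))) (some ((V.length + jn : Nat) : Int)) = L.take jn := by
          rw [PySem.Chars.slice_eq_listSlice,
            PySem.List.slice_natCast _ V.length (V.length + jn), hdropn]
          simp [List.take_append_of_le_length hjL]
        obtain ⟨f, rfl⟩ : ∃ f, fuel = f + 1 := ⟨fuel - 1, by simp at hfuel; omega⟩
        rw [pvLoopB]
        rw [if_neg (by rw [hI]; omega)]
        simp only [hI, hLe0, hRf]
        have hne : ((V.length + L.length : Nat) : Int) ≠ -1 := by omega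
        simp only [hne, if_false]
        rw [show ((V.length : Int) - 1) + 1 = (V.length : Int) by omega]
        rw [if_neg (show ¬ (((V.length + L.length : Nat) : Int) <
            ((V.length + jn : Nat) : Int) + (kw.length : Int)) by push_cast; omega)]
        rw [hLine, hBefore]
        have hposeq : ((V.length + L.length : Nat) : Int) + 1 = ((V ++ L ++ ['\n']).length : Int) := by
          simp; omega
        by_cases hb1 : (PySem.Chars.startswith L ['#'] ||
            PySem.Chars.isIn ('[' :: kw ++ [']']) L) = true
        · rw [if_pos hb1]
          have hel : pvElig kw L = false := by
            rw [pvEligOfFind jn hf, hb1]; rfl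
          rw [hposeq, hshape, ih (V ++ L ++ ['\n']) f (by simp) hrest2 (Or.inr ⟨V ++ L, rfl⟩)
            (by simp at hfuel ⊢; omega)]
          rw [pvSplicedConsFalse rep _ hel,
            pvJoinConsNe _ _ (pvSplicedNe rep _ (by simp))]
          simp
        · rw [if_neg hb1]
          by_cases hb2 : (PySem.Chars.isIn ['['] (L.take jn) &&
              !(PySem.Chars.isIn [']', '('] (PySem.Chars.slice (L.take jn)
                (some (PySem.Chars.rfind (L.take jn) ['['])) none))) = true
          · rw [if_pos hb2]
            have hel : pvElig kw L = false := by
              rw [pvEligOfFind jn hf, hb2]; simp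
            rw [hposeq, hshape, ih (V ++ L ++ ['\n']) f (by simp) hrest2 (Or.inr ⟨V ++ L, rfl⟩)
              (by simp at hfuel ⊢; omega)]
            rw [pvSplicedConsFalse rep _ hel,
              pvJoinConsNe _ _ (pvSplicedNe rep _ (by simp))]
            simp
          · rw [if_neg hb2]
            have hel : pvElig kw L = true := by
              simp only [Bool.not_eq_true] at hb1 hb2
              rw [pvEligOfFind jn hf, hb1, hb2]; rfl
            have hS1 : PySem.Chars.slice (V ++ (L ++ '\n' :: PySem.Chars.join ['\n'] (L2 :: rest3)))
                none (some ((V.length + jn : Nat) : Int)) = V ++ L.take jn := by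
              rw [PySem.Chars.slice_eq_listSlice, PySem.List.slice_to _ (by positivity),
                show (((V.length + jn : Nat) : Int)).toNat = V.length + jn by omega, htake]
            have hS2 : PySem.Chars.slice (V ++ (L ++ '\n' :: PySem.Chars.join ['\n'] (L2 :: rest3)))
                (some (((V.length + jn : Nat) : Int) + (kw.length : Int))) none =
                L.drop (jn + kw.length) ++ '\n' :: PySem.Chars.join ['\n'] (L2 :: rest3) := by
              rw [PySem.Chars.slice_eq_listSlice, PySem.List.slice_from _ (by positivity),
                show ((((V.length + jn : Nat) : Int)) + (kw.length : Int)).toNat =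
                  V.length + (jn + kw.length) by omega]
              rw [List.drop_append]
              have h1 : List.drop (V.length + (jn + kw.length)) V = [] :=
                List.drop_eq_nil_of_le (by omega)
              simp [h1, List.drop_append_of_le_length hjk]
            rw [hS1, hS2, pvSplicedConsTrue rep _ hel,
              pvJoinConsNe (pvReplaceFirst L kw rep) (L2 :: rest3) (by simp),
              pvReplaceFirstChar rep jn hf]
            simp

theorem pvPrefixGet {x y : List Char} (h : x <+: y) (j : Nat) (hj : j < x.length) :
    y[j]? = x[j]? := by
  rcases h with ⟨t, rfl⟩
  exact List.getElem?_append_left hj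

theorem pvLoopBNl (cs kw rep : List Char) (hk : '\n' ∈ kw) :
    ∀ (fuel : Nat) (p : Int), 0 ≤ p → pvLoopB cs kw rep p fuel = cs := by
  intro fuel
  induction fuel with
  | zero => intro p _; rfl
  | succ f ihn =>
    intro p hp
    rw [pvLoopB]
    by_cases hi : PySem.Chars.findFrom cs kw p none = -1
    · rw [if_pos hi]
    · rw [if_neg hi]
      obtain ⟨hi0, hip, hilen⟩ := pvFindFromBounds cs kw p hi
      obtain ⟨u, w, huw⟩ := List.append_of_mem hk
      have hcastp : ((p.toNat : Nat) : Int) = p := by omega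
      have hfi : PySem.Chars.findFrom cs kw ((p.toNat : Nat) : Int) none =
          PySem.Chars.findFrom cs kw p none := by rw [hcastp]
      have hspec := PySem.Chars.findFrom_natCast_spec cs kw p.toNat (by omega)
        (by rw [hfi]; exact hi)
      rw [hfi] at hspec
      have hprekw : kw <+: cs.drop (PySem.Chars.findFrom cs kw p none).toNat := hspec.2.1
      have hulen : u.length < kw.length := by
        rw [huw, List.length_append, List.length_cons]; omega
      have hnlget : cs[(PySem.Chars.findFrom cs kw p none).toNat + u.length]? = some '\n' := by
        have h1 : (cs.drop (PySem.Chars.findFrom cs kw p none).toNat)[u.length]? = kw[u.length]? :=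
          pvPrefixGet hprekw u.length hulen
        have h2 : kw[u.length]? = some '\n' := by
          rw [huw]
          rw [List.getElem?_append_right (Nat.le_refl u.length)]
          simp
        have h3 : (cs.drop (PySem.Chars.findFrom cs kw p none).toNat)[u.length]? =
            cs[(PySem.Chars.findFrom cs kw p none).toNat + u.length]? := List.getElem?_drop
        rw [← h3, h1, h2]
      have hcasti : (((PySem.Chars.findFrom cs kw p none).toNat : Nat) : Int) =
          PySem.Chars.findFrom cs kw p none := by omega
      have hmemnl : '\n' ∈ cs.drop (PySem.Chars.findFrom cs kw p none).toNat := by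
        apply List.mem_of_getElem? (i := u.length)
        have h3 : (cs.drop (PySem.Chars.findFrom cs kw p none).toNat)[u.length]? =
            cs[(PySem.Chars.findFrom cs kw p none).toNat + u.length]? := List.getElem?_drop
        rw [h3, hnlget]
      have hle0ne : PySem.Chars.findFrom cs ['\n'] (PySem.Chars.findFrom cs kw p none) none ≠ -1 := by
        rw [← hcasti]
        rw [Ne, PySem.Chars.findFrom_natCast_eq_neg_one_iff cs ['\n'] _ (by omega)]
        intro hno
        apply hno
        obtain ⟨s, t, hst⟩ := List.append_of_mem hmemnl
        exact ⟨s, t, by rw [hst]; simp⟩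
      have hle0spec := PySem.Chars.findFrom_natCast_spec cs ['\n']
        (PySem.Chars.findFrom cs kw p none).toNat (by omega) (by rw [hcasti]; exact hle0ne)
      rw [hcasti] at hle0spec
      obtain ⟨hle0ge, hle0pre, hle0min⟩ := hle0spec
      obtain ⟨hle00, hle0i, hle0len⟩ := pvFindFromBounds cs ['\n']
        (PySem.Chars.findFrom cs kw p none) hle0ne
      have hle0le : PySem.Chars.findFrom cs ['\n'] (PySem.Chars.findFrom cs kw p none) none ≤
          PySem.Chars.findFrom cs kw p none + u.length := by
        by_contra hgt
        apply hle0min ((PySem.Chars.findFrom cs kw p none).toNat + u.length) (by omega) (by omega)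
        exact List.isPrefixOf_iff_prefix.mp ((pvSinglePrefix' '\n' cs _).mpr hnlget)
      simp only [hle0ne, if_false]
      rw [if_pos (show PySem.Chars.findFrom cs ['\n'] (PySem.Chars.findFrom cs kw p none) none <
          PySem.Chars.findFrom cs kw p none + (kw.length : Int) by omega)]
      exact ihn _ (by omega)

theorem pvAJoin (kw rep : List Char) (lines : List (List Char)) :
    (List.foldl (pvStepA kw rep) (false, []) lines).2 = pvSpliced kw rep lines := by
  rw [pvFoldlStepAFalse]
  unfold pvSpliced
  cases h : lines.findIdx? (pvElig kw) <;> simp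

theorem safe_replace_first_py_spec : Claim_equal_safe_replace_first_py := by
  intro content keyword replacement _
  unfold Spec_safe_replace_first_py safe_replace_first_py safe_replace_first_py_alt
  simp only [pvSplitOn_eq]
  apply congrArg
  rw [pvAJoin]
  by_cases hnl : '\n' ∈ keyword.toList
  · rw [pvLoopBNl _ _ _ hnl _ 0 (by omega)]
    rw [pvSplicedNone _ _ (fun L hL => by
      apply pvEligFalseOfFind
      rw [PySem.Chars.find_eq_neg_one_iff]
      intro hinf
      exact pvSplit_no_nl content.toList L hL (hinf.subset hnl))]
    rw [pvSplit_join]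
  · have h := pvLoopBMain keyword.toList replacement.toList hnl (pvSplit content.toList) []
      (content.toList.length + 2) (pvSplit_ne_nil _) (pvSplit_no_nl _) (Or.inl rfl)
      (by simp [pvSplit_join])
    simp only [List.nil_append, List.length_nil, Nat.cast_zero] at h
    rw [pvSplit_join] at h
    rw [h]
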